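-- pv_equiv track=rewrite | github.com/MoonHah/COMP646_NBA_Meme_Sentiment_Classification | scripts/reporting/make_report_visualizations.py | missing_extra_counts
-- ===== SOURCE A (Python) =====
-- from collections import Counter
-- from typing import Any
--
-- def missing_extra_counts(metrics_split: dict[str, Any], division_labels: list[str]) -> tuple[list[int], list[int]]:
--     missing = Counter()
--     extra = Counter()
--     for item in metrics_split.get("generations", []):
--         gold = set(item.get("gold_divisions", []))
--         pred = set(item.get("pred_divisions", []))
--         for label in gold - pred:
--             missing[label] += 1
--         for label in pred - gold:
--             extra[label] += 1
--     return [missing[label] for label in division_labels], [extra[label] for label in division_labels]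
-- ===== SOURCE B (Python) =====
-- def missing_extra_counts(metrics_split, division_labels):
--     gens = metrics_split.get("generations", [])
--     missing = [sum(1 for item in gens
--                    if label in set(item.get("gold_divisions", [])) - set(item.get("pred_divisions", [])))
--                for label in division_labels]
--     extra = [sum(1 for item in gens
--                  if label in set(item.get("pred_divisions", [])) - set(item.get("gold_divisions", [])))
--              for label in division_labels]
--     return missing, extra
-- ===== Notes on version B (the rewrite author's own statement) =====
-- stated objective: alternative
-- what changed: Replaces A's single accumulating pass that builds two Counters with per-label list comprehensions that count matching generation items directly, inverting the loop nesting and dropping the Counter data structure.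
import Mathlib
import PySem

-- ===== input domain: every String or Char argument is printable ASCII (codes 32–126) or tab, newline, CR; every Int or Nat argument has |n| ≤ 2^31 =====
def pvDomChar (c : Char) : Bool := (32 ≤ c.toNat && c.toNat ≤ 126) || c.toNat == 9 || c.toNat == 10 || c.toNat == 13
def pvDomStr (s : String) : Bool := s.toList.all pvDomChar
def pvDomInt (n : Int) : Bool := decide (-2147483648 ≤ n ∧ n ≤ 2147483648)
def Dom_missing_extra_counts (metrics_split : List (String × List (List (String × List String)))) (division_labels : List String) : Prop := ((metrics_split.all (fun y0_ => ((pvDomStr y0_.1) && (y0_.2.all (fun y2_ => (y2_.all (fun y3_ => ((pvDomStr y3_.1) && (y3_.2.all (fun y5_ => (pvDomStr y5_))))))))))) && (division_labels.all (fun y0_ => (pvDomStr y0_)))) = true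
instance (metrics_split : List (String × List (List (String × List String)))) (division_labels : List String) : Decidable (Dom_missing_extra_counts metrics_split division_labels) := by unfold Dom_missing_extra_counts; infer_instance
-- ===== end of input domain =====

-- B replaces A's single accumulating pass over two Counters by per-label comprehensions
-- that count matching generations directly (objective: alternative decomposition; similar cost).

-- ===== PORT A =====
def missing_extra_counts (metrics_split : List (String × List (List (String × List String)))) (division_labels : List String) : List Int × List Int :=
  -- missing = Counter(); extra = Counter(); for item in …: …
  let st :=
    (PySem.Dict.getD (PySem.Dict.mk metrics_split) "generations" []).foldl
      (fun (st : PySem.Dict String Int × PySem.Dict String Int) item =>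
        let gold := PySem.Set.ofList (PySem.Dict.getD (PySem.Dict.mk item) "gold_divisions" [])
        let pred := PySem.Set.ofList (PySem.Dict.getD (PySem.Dict.mk item) "pred_divisions" [])
        let missing := (PySem.Set.diff gold pred).foldl (fun d label => d.modify label 0 (· + 1)) st.1
        let extra := (PySem.Set.diff pred gold).foldl (fun d label => d.modify label 0 (· + 1)) st.2
        (missing, extra))
      (PySem.Dict.empty, PySem.Dict.empty)
  (division_labels.map (fun label => st.1.getD label 0),
   division_labels.map (fun label => st.2.getD label 0))

-- ===== PORT B =====
def missing_extra_counts_alt (metrics_split : List (String × List (List (String × List String)))) (division_labels : List String) : List Int × List Int :=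
  let gens := PySem.Dict.getD (PySem.Dict.mk metrics_split) "generations" []
  -- sum(1 for item in gens if label in set(gold) - set(pred))
  (division_labels.map (fun label =>
     ((gens.countP (fun item =>
        PySem.Set.contains
          (PySem.Set.diff (PySem.Set.ofList (PySem.Dict.getD (PySem.Dict.mk item) "gold_divisions" []))
                          (PySem.Set.ofList (PySem.Dict.getD (PySem.Dict.mk item) "pred_divisions" []))) label) : Nat) : Int)),
   division_labels.map (fun label =>
     ((gens.countP (fun item =>
        PySem.Set.contains
          (PySem.Set.diff (PySem.Set.ofList (PySem.Dict.getD (PySem.Dict.mk item) "pred_divisions" []))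
                          (PySem.Set.ofList (PySem.Dict.getD (PySem.Dict.mk item) "gold_divisions" []))) label) : Nat) : Int)))

-- ===== PRECONDITION & SPEC =====
def Spec_missing_extra_counts (metrics_split : List (String × List (List (String × List String)))) (division_labels : List String) (out : List Int × List Int) : Prop := out = missing_extra_counts_alt metrics_split division_labels
instance (metrics_split : List (String × List (List (String × List String)))) (division_labels : List String) (out : List Int × List Int) : Decidable (Spec_missing_extra_counts metrics_split division_labels out) := by unfold Spec_missing_extra_counts; infer_instance

-- ===== CLAIM (what is proved, stated in full; the proofs are below) =====
def Claim_equal_missing_extra_counts : Prop := ∀ (metrics_split : List (String × List (List (String × List String)))) (division_labels : List String), Dom_missing_extra_counts metrics_split division_labels → Spec_missing_extra_counts metrics_split division_labels (missing_extra_counts metrics_split division_labels)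

-- ===== LEMMAS AND PROOFS =====

-- counting into a Dict over a Nodup list adds 1 exactly when the label is a member
theorem pv_getD_foldl_set (s : List String) (hs : s.Nodup) (d : PySem.Dict String Int) (l : String) :
    (s.foldl (fun d label => d.modify label 0 (· + 1)) d).getD l 0
      = d.getD l 0 + (if l ∈ s then 1 else 0) := by
  rw [PySem.Dict.getD_foldl_modify_add_one]
  by_cases h : l ∈ s
  · simp [h, List.count_eq_one_of_mem hs h]
  · simp [h, List.count_eq_zero.mpr h]

-- main invariant for A's fold
theorem pv_fold_inv (gens : List (List (String × List String)))
    (m e : PySem.Dict String Int) (l : String) :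
    ((gens.foldl (fun (st : PySem.Dict String Int × PySem.Dict String Int) (item : List (String × List String)) =>
        ((PySem.Set.diff (PySem.Set.ofList (PySem.Dict.getD (PySem.Dict.mk item) "gold_divisions" []))
                         (PySem.Set.ofList (PySem.Dict.getD (PySem.Dict.mk item) "pred_divisions" []))).foldl
           (fun d label => d.modify label 0 (· + 1)) st.1,
         (PySem.Set.diff (PySem.Set.ofList (PySem.Dict.getD (PySem.Dict.mk item) "pred_divisions" []))
                         (PySem.Set.ofList (PySem.Dict.getD (PySem.Dict.mk item) "gold_divisions" []))).foldl
           (fun d label => d.modify label 0 (· + 1)) st.2)) (m, e)).1.getD l 0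
       = m.getD l 0 + ((gens.countP (fun item =>
           PySem.Set.contains
             (PySem.Set.diff (PySem.Set.ofList (PySem.Dict.getD (PySem.Dict.mk item) "gold_divisions" []))
                             (PySem.Set.ofList (PySem.Dict.getD (PySem.Dict.mk item) "pred_divisions" []))) l) : Nat)))
    ∧ ((gens.foldl (fun (st : PySem.Dict String Int × PySem.Dict String Int) (item : List (String × List String)) =>
        ((PySem.Set.diff (PySem.Set.ofList (PySem.Dict.getD (PySem.Dict.mk item) "gold_divisions" []))
                         (PySem.Set.ofList (PySem.Dict.getD (PySem.Dict.mk item) "pred_divisions" []))).foldl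
           (fun d label => d.modify label 0 (· + 1)) st.1,
         (PySem.Set.diff (PySem.Set.ofList (PySem.Dict.getD (PySem.Dict.mk item) "pred_divisions" []))
                         (PySem.Set.ofList (PySem.Dict.getD (PySem.Dict.mk item) "gold_divisions" []))).foldl
           (fun d label => d.modify label 0 (· + 1)) st.2)) (m, e)).2.getD l 0
       = e.getD l 0 + ((gens.countP (fun item =>
           PySem.Set.contains
             (PySem.Set.diff (PySem.Set.ofList (PySem.Dict.getD (PySem.Dict.mk item) "pred_divisions" []))
                             (PySem.Set.ofList (PySem.Dict.getD (PySem.Dict.mk item) "gold_divisions" []))) l) : Nat))) := by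
  induction gens generalizing m e with
  | nil => simp
  | cons item rest ih =>
    have hgp := PySem.Set.nodup_diff
      (s := PySem.Set.ofList (PySem.Dict.getD (PySem.Dict.mk item) "gold_divisions" []))
      (t := PySem.Set.ofList (PySem.Dict.getD (PySem.Dict.mk item) "pred_divisions" []))
      (PySem.Set.nodup_ofList _)
    have hpg := PySem.Set.nodup_diff
      (s := PySem.Set.ofList (PySem.Dict.getD (PySem.Dict.mk item) "pred_divisions" []))
      (t := PySem.Set.ofList (PySem.Dict.getD (PySem.Dict.mk item) "gold_divisions" []))
      (PySem.Set.nodup_ofList _)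
    simp only [List.foldl_cons, List.countP_cons]
    obtain ⟨ih1, ih2⟩ := ih _ _
    refine ⟨?_, ?_⟩
    · rw [ih1, pv_getD_foldl_set _ hgp]
      by_cases h : l ∈ PySem.Set.diff (PySem.Set.ofList (PySem.Dict.getD (PySem.Dict.mk item) "gold_divisions" []))
                      (PySem.Set.ofList (PySem.Dict.getD (PySem.Dict.mk item) "pred_divisions" []))
      · have hc : PySem.Set.contains (PySem.Set.diff (PySem.Set.ofList (PySem.Dict.getD (PySem.Dict.mk item) "gold_divisions" []))
                      (PySem.Set.ofList (PySem.Dict.getD (PySem.Dict.mk item) "pred_divisions" []))) l = true := by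
          simpa [PySem.Set.contains_eq_listContains] using h
        rw [if_pos h, hc]; simp only [if_pos]; omega
      · have hc : PySem.Set.contains (PySem.Set.diff (PySem.Set.ofList (PySem.Dict.getD (PySem.Dict.mk item) "gold_divisions" []))
                      (PySem.Set.ofList (PySem.Dict.getD (PySem.Dict.mk item) "pred_divisions" []))) l = false := by
          rw [PySem.Set.contains_eq_listContains]
          simpa using h
        rw [if_neg h, hc]; simp only [Bool.false_eq_true, if_false]; omega
    · rw [ih2, pv_getD_foldl_set _ hpg]
      by_cases h : l ∈ PySem.Set.diff (PySem.Set.ofList (PySem.Dict.getD (PySem.Dict.mk item) "pred_divisions" []))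
                      (PySem.Set.ofList (PySem.Dict.getD (PySem.Dict.mk item) "gold_divisions" []))
      · have hc : PySem.Set.contains (PySem.Set.diff (PySem.Set.ofList (PySem.Dict.getD (PySem.Dict.mk item) "pred_divisions" []))
                      (PySem.Set.ofList (PySem.Dict.getD (PySem.Dict.mk item) "gold_divisions" []))) l = true := by
          simpa [PySem.Set.contains_eq_listContains] using h
        rw [if_pos h, hc]; simp only [if_pos]; omega
      · have hc : PySem.Set.contains (PySem.Set.diff (PySem.Set.ofList (PySem.Dict.getD (PySem.Dict.mk item) "pred_divisions" []))
                      (PySem.Set.ofList (PySem.Dict.getD (PySem.Dict.mk item) "gold_divisions" []))) l = false := by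
          rw [PySem.Set.contains_eq_listContains]
          simpa using h
        rw [if_neg h, hc]; simp only [Bool.false_eq_true, if_false]; omega

-- ===== VERDICT (by name: the statement is the Claim_ definition above) =====
theorem missing_extra_counts_spec : Claim_equal_missing_extra_counts := by
  intro ms dl _
  unfold Spec_missing_extra_counts missing_extra_counts missing_extra_counts_alt
  have h := pv_fold_inv (PySem.Dict.getD (PySem.Dict.mk ms) "generations" []) PySem.Dict.empty PySem.Dict.empty
  refine Prod.ext ?_ ?_
  · simp only [List.map_inj_left]
    intro l _
    have h1 := (h l).1
    rw [PySem.Dict.getD_empty, zero_add] at h1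
    exact h1
  · simp only [List.map_inj_left]
    intro l _
    have h2 := (h l).2
    rw [PySem.Dict.getD_empty, zero_add] at h2
    exact h2
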